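-- pv_equiv track=rewrite | github.com/unsung107/TIL | homestudy/17-2.py | chang
-- ===== SOURCE A (Python) =====
-- def chang(a,b):
--     for i in range(min(len(a),len(b))) :
--         if a[i] > b[i] :
--
--             return b,a
--             break
--
--         elif a[i] < b[i]:
--
--             return a,b
--             break
-- ===== SOURCE B (Python) =====
-- def chang(a, b):
--     m = min(len(a), len(b))
--     pa, pb = tuple(a[:m]), tuple(b[:m])
--     if pa < pb:
--         return a, b
--     elif pa > pb:
--         return b, a
-- ===== Notes on version B (the rewrite author's own statement) =====
-- stated objective: simpler
-- what changed: Replaces the explicit index loop with one built-in lexicographic comparison of the equal-length prefixes, returning the ordered pair from a single branch.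
-- outside the precondition, e.g. on chang([1, 2], [1]): A returns None, B returns None; on chang([1], [1]): A returns None, B returns None
import Mathlib
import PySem

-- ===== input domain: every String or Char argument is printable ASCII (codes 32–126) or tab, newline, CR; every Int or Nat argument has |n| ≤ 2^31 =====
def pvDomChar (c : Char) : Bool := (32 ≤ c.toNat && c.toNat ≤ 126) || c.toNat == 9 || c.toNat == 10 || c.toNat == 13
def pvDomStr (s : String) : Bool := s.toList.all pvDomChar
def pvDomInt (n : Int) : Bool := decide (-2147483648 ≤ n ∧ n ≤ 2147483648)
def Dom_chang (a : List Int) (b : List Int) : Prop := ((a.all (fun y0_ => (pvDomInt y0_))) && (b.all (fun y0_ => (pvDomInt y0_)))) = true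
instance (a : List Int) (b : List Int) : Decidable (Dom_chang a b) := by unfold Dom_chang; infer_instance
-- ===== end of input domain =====

-- B replaces A's index loop by one lexicographic comparison of the equal-length prefixes (objective: simpler).
-- Pre_ excludes inputs whose common-length prefixes are equal, where Python A falls through and returns None
-- (not a pair); the ports return ([], []) there, a value the claim does not cover.

-- ===== PORT A =====
-- the for-loop over range(min(len(a),len(b))): early return = Option, none = fell through
def changLoop (a : List Int) (b : List Int) : List Int → Option (List Int × List Int)
  | [] => none
  | i :: rest =>
    match PySem.List.pyGet? a i, PySem.List.pyGet? b i with
    | some ai, some bi =>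
      if ai > bi then some (b, a)
      else if ai < bi then some (a, b)
      else changLoop a b rest
    | _, _ => none   -- unreachable: i < min(len a, len b)

def chang (a : List Int) (b : List Int) : List Int × List Int :=
  (changLoop a b (PySem.List.pyRange 0 (min (a.length : Int) (b.length : Int)) 1)).getD ([], [])

-- ===== PORT B =====
-- built-in tuple comparison 'pa < pb' / 'pa > pb', as a three-way lexicographic compare
def lexCmp : List Int → List Int → Ordering
  | [], [] => .eq
  | [], _ :: _ => .lt
  | _ :: _, [] => .gt
  | x :: xs, y :: ys => if x < y then .lt else if y < x then .gt else lexCmp xs ys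

def chang_alt (a : List Int) (b : List Int) : List Int × List Int :=
  let m := min a.length b.length
  match lexCmp (a.take m) (b.take m) with
  | .lt => (a, b)
  | .gt => (b, a)
  | .eq => ([], [])   -- fell through: Python returns None; outside Pre_

-- ===== PRECONDITION & SPEC =====
-- Pre_ excludes exactly the inputs whose common-length prefixes coincide: there Python A (and B) returns None,
-- which is not a value of the declared pair type.
def Pre_chang (a : List Int) (b : List Int) : Prop :=
  a.take (min a.length b.length) ≠ b.take (min a.length b.length)
instance (a : List Int) (b : List Int) : Decidable (Pre_chang a b) := by unfold Pre_chang; infer_instance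

def pvWitness_chang : List Int × List Int := ([1, 2], [1, 3])

def Spec_chang (a : List Int) (b : List Int) (out : List Int × List Int) : Prop := out = chang_alt a b
instance (a : List Int) (b : List Int) (out : List Int × List Int) : Decidable (Spec_chang a b out) := by unfold Spec_chang; infer_instance

-- ===== CLAIM (what is proved, stated in full; the proofs are below) =====
def Claim_equal_chang : Prop := ∀ (a : List Int) (b : List Int), Dom_chang a b → Pre_chang a b → Spec_chang a b (chang a b)

-- ===== LEMMAS AND PROOFS =====

-- lexCmp on equal lists is eq, and eq forces equality
theorem lexCmp_eq_iff : ∀ (xs ys : List Int), lexCmp xs ys = .eq ↔ xs = ys := by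
  intro xs
  induction xs with
  | nil => intro ys; cases ys <;> simp [lexCmp]
  | cons x xs ih =>
    intro ys
    cases ys with
    | nil => simp [lexCmp]
    | cons y ys =>
      simp only [lexCmp]
      split_ifs with h1 h2
      · constructor <;> intro h <;> simp_all
      · constructor <;> intro h <;> simp_all
      · have hxy : x = y := by omega
        simp [hxy, ih]

-- the loop from index i matches lexCmp on the drops
theorem loop_eq (a b : List Int) :
    ∀ (k i : Nat), i + k = min a.length b.length →
    changLoop a b (PySem.List.pyRange (i : Int) (min (a.length : Int) (b.length : Int)) 1) =
      (match lexCmp ((a.drop i).take k) ((b.drop i).take k) with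
       | .lt => some (a, b)
       | .gt => some (b, a)
       | .eq => none) := by
  intro k
  induction k with
  | zero =>
    intro i hi
    have hm : min (a.length : Int) (b.length : Int) = (i : Int) := by
      omega
    rw [hm, PySem.List.pyRange_one_eq_nil (by omega)]
    simp [changLoop, lexCmp]
  | succ k ih =>
    intro i hi
    have hia : i < a.length := by omega
    have hib : i < b.length := by omega
    have hlt : (i : Int) < min (a.length : Int) (b.length : Int) := by omega
    rw [PySem.List.pyRange_one_cons hlt]
    simp only [changLoop]
    rw [PySem.List.pyGet?_ofNat a i hia, PySem.List.pyGet?_ofNat b i hib]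
    have hda : a.drop i = a[i] :: a.drop (i + 1) := List.drop_eq_getElem_cons hia
    have hdb : b.drop i = b[i] :: b.drop (i + 1) := List.drop_eq_getElem_cons hib
    rw [hda, hdb]
    simp only [List.take_succ_cons, lexCmp]
    by_cases h1 : a[i] > b[i]
    · simp [h1, show ¬ a[i] < b[i] by omega]
    · by_cases h2 : a[i] < b[i]
      · simp [h1, h2]
      · simp only [if_neg (by omega : ¬ a[i] < b[i]), if_neg (by omega : ¬ b[i] < a[i]),
          if_neg h1, if_neg h2]
        have : ((i : Int) + 1) = ((i + 1 : Nat) : Int) := by push_cast; ring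
        rw [this, ih (i + 1) (by omega)]

theorem chang_eq_alt (a b : List Int) (h : Pre_chang a b) : chang a b = chang_alt a b := by
  unfold chang chang_alt
  have h0 : (0 : Int) = ((0 : Nat) : Int) := rfl
  rw [h0, loop_eq a b (min a.length b.length) 0 (by omega)]
  simp only [List.drop_zero]
  have hne : lexCmp (a.take (min a.length b.length)) (b.take (min a.length b.length)) ≠ .eq := by
    intro hc; exact h ((lexCmp_eq_iff _ _).mp hc)
  cases hcmp : lexCmp (a.take (min a.length b.length)) (b.take (min a.length b.length)) <;>
    simp_all

-- ===== VERDICT (by name: the statement is the Claim_ definition above) =====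
theorem chang_spec : Claim_equal_chang := by
  intro a b _ hpre
  unfold Spec_chang
  exact chang_eq_alt a b hpre
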